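-- pv_equiv track=rewrite | github.com/belilemccookh/dimos | dimos/dashboard/rerun_blueprint.py | _pick_primary_image_paths
-- ===== SOURCE A (Python) =====
-- from collections.abc import Iterable, Mapping
--
-- def _pick_primary_image_paths(entity_paths: Iterable[str]) -> list[str]:
--     """Pick a small set of image-like entity paths for dedicated 2D panels."""
--     paths = list(entity_paths)
--     # Prefer common names first.
--     preferred = []
--     for key in ("camera/image", "camera", "color_image", "rgb", "image", "debug"):
--         for p in paths:
--             if key in p:
--                 preferred.append(p)
--     # Deduplicate preserving order.
--     out: list[str] = []
--     for p in preferred: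
--         if p not in out:
--             out.append(p)
--     return out[:2]
-- ===== SOURCE B (Python) =====
-- def _pick_primary_image_paths(entity_paths):
--     """Pick a small set of image-like entity paths for dedicated 2D panels."""
--     keys = ("camera/image", "camera", "color_image", "rgb", "image", "debug")
--     ranked = []
--     for idx, p in enumerate(entity_paths):
--         r = next((i for i, k in enumerate(keys) if k in p), None)
--         if r is not None:
--             ranked.append((r, idx, p))
--     ranked.sort(key=lambda t: (t[0], t[1]))
--     out = list(dict.fromkeys(p for _, _, p in ranked))
--     return out[:2]
-- ===== Notes on version B (the rewrite author's own statement) =====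
-- stated objective: alternative
-- what changed: Replaces the keyword-major nested grouping (6 passes over the paths, duplicates collected then removed by a quadratic membership scan) with a single decorate-sort-undecorate pass: each path gets (first-matching-keyword index, input index), the decorated list is sorted and deduplicated via dict.fromkeys.
import Mathlib
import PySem

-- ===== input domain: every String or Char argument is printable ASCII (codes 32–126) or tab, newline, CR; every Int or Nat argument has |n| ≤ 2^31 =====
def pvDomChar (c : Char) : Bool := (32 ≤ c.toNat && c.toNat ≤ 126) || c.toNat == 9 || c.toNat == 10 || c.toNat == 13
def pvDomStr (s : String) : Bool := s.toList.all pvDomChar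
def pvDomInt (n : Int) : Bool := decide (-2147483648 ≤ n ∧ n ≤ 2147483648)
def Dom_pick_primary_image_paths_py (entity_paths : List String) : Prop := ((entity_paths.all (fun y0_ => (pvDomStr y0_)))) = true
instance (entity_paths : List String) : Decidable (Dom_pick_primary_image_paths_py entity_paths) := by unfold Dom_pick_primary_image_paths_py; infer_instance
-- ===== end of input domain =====

-- B replaces A's keyword-major nested grouping and quadratic dedup scan by a decorate-sort-undecorate pass
-- (rank each path by its first matching keyword, sort the (rank, index, path) triples, dedup): an alternative algorithm.

-- ===== PORT A =====
def pick_primary_image_paths_py (entity_paths : List String) : List String :=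
  let paths := entity_paths
  let preferred := (["camera/image", "camera", "color_image", "rgb", "image", "debug"] : List String).foldl
    (fun preferred key =>
      paths.foldl (fun preferred p => if PySem.Str.isIn key p then preferred ++ [p] else preferred) preferred) []
  let out := preferred.foldl (fun out p => if out.contains p then out else out ++ [p]) []
  PySem.List.slice out none (some 2)

-- ===== PORT B =====
def pvKeywords : List String := ["camera/image", "camera", "color_image", "rgb", "image", "debug"]

-- next((i for i, k in enumerate(keys) if k in p), None): index of the first keyword contained in p
def pvRank (p : String) : Option Nat := pvKeywords.findIdx? (fun k => PySem.Str.isIn k p)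

def pick_primary_image_paths_py_alt (entity_paths : List String) : List String :=
  let ranked := (PySem.List.enumerate entity_paths).foldl (fun acc e =>
      match pvRank e.2 with
      | some r => acc ++ [(r, e.1, e.2)]
      | none => acc) []
  let sortedR := PySem.List.sorted2 ranked (fun t => t.1) (fun t => t.2.1)
  let out := PySem.List.dedup (sortedR.map (fun t => t.2.2))
  PySem.List.slice out none (some 2)

-- ===== PRECONDITION & SPEC =====
def Spec_pick_primary_image_paths_py (entity_paths : List String) (out : List String) : Prop := out = pick_primary_image_paths_py_alt entity_paths
instance (entity_paths : List String) (out : List String) : Decidable (Spec_pick_primary_image_paths_py entity_paths out) := by unfold Spec_pick_primary_image_paths_py; infer_instance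

-- ===== CLAIM (what is proved, stated in full; the proofs are below) =====
def Claim_equal_pick_primary_image_paths_py : Prop := ∀ (entity_paths : List String), Dom_pick_primary_image_paths_py entity_paths → Spec_pick_primary_image_paths_py entity_paths (pick_primary_image_paths_py entity_paths)

-- ===== LEMMAS AND PROOFS =====

lemma pv_update_filter_congr (c q : String → Bool)
    (himp : ∀ p, q p = true → c p = true) :
    ∀ (paths : List String) (s : PySem.Set String),
    (∀ p ∈ paths, c p = true → q p = false → p ∈ s) →
    PySem.Set.update s (paths.filter c) = PySem.Set.update s (paths.filter q) := by
  intro paths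
  induction paths with
  | nil => intro s _; rfl
  | cons p rest ih =>
    intro s hs
    by_cases hc : c p = true
    · by_cases hq : q p = true
      · simp only [List.filter_cons, hc, hq, if_pos]
        show PySem.Set.update (s.add p) (rest.filter c) = PySem.Set.update (s.add p) (rest.filter q)
        exact ih _ fun x hx h1 h2 => (PySem.Set.mem_add s p x).mpr (Or.inl (hs x (List.mem_cons_of_mem _ hx) h1 h2))
      · have hq' : q p = false := by simpa using hq
        have hmem : p ∈ s := hs p List.mem_cons_self hc hq'
        simp only [List.filter_cons, hc, hq', if_pos, Bool.false_eq_true, if_false]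
        show PySem.Set.update (s.add p) (rest.filter c) = PySem.Set.update s (rest.filter q)
        rw [PySem.Set.add_of_mem hmem]
        exact ih _ fun x hx h1 h2 => hs x (List.mem_cons_of_mem _ hx) h1 h2
    · have hc' : c p = false := by simpa using hc
      have hq' : q p = false := by
        by_contra h
        exact hc (himp p (by simpa using h))
      simp only [List.filter_cons, hc', hq', Bool.false_eq_true, if_false]
      exact ih _ fun x hx h1 h2 => hs x (List.mem_cons_of_mem _ hx) h1 h2

lemma pvRank_isIn {p : String} {r : Nat} (h : pvRank p = some r) :
    PySem.Str.isIn (pvKeywords[r]!) p = true := by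
  obtain ⟨hlt, hp, -⟩ := List.findIdx?_eq_some_iff_getElem.mp h
  simpa [List.getElem!_eq_getElem?_getD, List.getElem?_eq_getElem hlt] using hp
lemma pvRank_min {p : String} {i : Nat} (hi : i < pvKeywords.length)
    (hp : PySem.Str.isIn (pvKeywords[i]) p = true) :
    ∃ j, pvRank p = some j ∧ j ≤ i := by
  have hs : (pvKeywords.findIdx? (fun k => PySem.Str.isIn k p)).isSome := by
    rw [List.findIdx?_isSome, List.any_eq_true]
    exact ⟨_, List.getElem_mem hi, hp⟩
  obtain ⟨j, hj⟩ := Option.isSome_iff_exists.mp hs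
  refine ⟨j, hj, ?_⟩
  obtain ⟨h1, h2, hmin⟩ := List.findIdx?_eq_some_iff_getElem.mp hj
  by_contra hgt
  exact hmin i (by omega) hp
lemma pv_update_append (s : PySem.Set String) (l1 l2 : List String) :
    PySem.Set.update s (l1 ++ l2) = PySem.Set.update (PySem.Set.update s l1) l2 := by
  simp [PySem.Set.update, List.foldl_append]

lemma pv_ofList_blocks (paths : List String) : ∀ (ks : List String) (off : Nat) (s : PySem.Set String),
    (∀ m (hm : m < ks.length), pvKeywords[off + m]? = some ks[m]) →
    (∀ p ∈ paths, ∀ j, pvRank p = some j → j < off → p ∈ s) →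
    PySem.Set.update s (ks.flatMap (fun k => paths.filter (fun p => PySem.Str.isIn k p)))
      = PySem.Set.update s ((List.range' off ks.length).flatMap
          (fun i => paths.filter (fun p => pvRank p == some i))) := by
  intro ks
  induction ks with
  | nil => intro off s _ _; rfl
  | cons k ks ih =>
    intro off s hks hinv
    have hk : pvKeywords[off]? = some k := by simpa using hks 0 (by simp)
    have hofflt : off < pvKeywords.length := by
      have := List.getElem?_eq_some_iff.mp hk
      exact this.1
    have hkval : pvKeywords[off] = k := (List.getElem?_eq_some_iff.mp hk).2
    have hstep : PySem.Set.update s (paths.filter (fun p => PySem.Str.isIn k p))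
        = PySem.Set.update s (paths.filter (fun p => pvRank p == some off)) := by
      apply pv_update_filter_congr
      · intro p hq
        have : pvRank p = some off := by simpa using hq
        have h1 := pvRank_isIn this
        rwa [List.getElem!_eq_getElem?_getD, hk] at h1
      · intro p hp hc hq
        obtain ⟨j, hj, hle⟩ := pvRank_min hofflt (by rwa [hkval])
        have : j ≠ off := by
          intro h; subst h; rw [hj] at hq; simp at hq
        exact hinv p hp j hj (by omega)
    rw [List.flatMap_cons, pv_update_append, hstep]
    rw [List.length_cons, List.range'_succ, List.flatMap_cons, pv_update_append]
    apply ih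
    · intro m hm
      have := hks (m + 1) (by simpa using Nat.succ_lt_succ hm)
      simpa [Nat.add_assoc, Nat.add_comm 1 m] using this
    · intro p hp j hj hlt
      rw [PySem.Set.mem_update]
      rcases Nat.lt_or_ge j off with h | h
      · exact Or.inl (hinv p hp j hj h)
      · have : j = off := by omega
        subst this
        exact Or.inr (List.mem_filter.mpr ⟨hp, by simp [hj]⟩)
lemma pvRank_lt {p : String} {r : Nat} (h : pvRank p = some r) : r < 6 := by
  obtain ⟨hlt, -, -⟩ := List.findIdx?_eq_some_iff_getElem.mp h
  simpa [pvKeywords] using hlt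
lemma pv_insertBy_append {α : Type} (before : α → α → Bool) (x : α) (l1 l2 : List α)
    (h : ∀ y ∈ l1, before x y = false) :
    PySem.List.insertBy before x (l1 ++ l2) = l1 ++ PySem.List.insertBy before x l2 := by
  induction l1 with
  | nil => rfl
  | cons y l1 ih =>
      have hy := h y (List.mem_cons_self)
      simp only [List.cons_append, PySem.List.insertBy, hy]
      simp [ih fun z hz => h z (List.mem_cons_of_mem _ hz)]
lemma pv_insertBy_cons_head {α : Type} (before : α → α → Bool) (x : α) (l : List α)
    (h : ∀ z ∈ l.head?, before x z = true) :
    PySem.List.insertBy before x l = x :: l := by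
  cases l with
  | nil => rfl
  | cons z l => simp [PySem.List.insertBy, h z rfl]

def pvBefore (a b : Nat × Int × String) : Bool :=
  decide (a.1 < b.1) || (!decide (b.1 < a.1) && decide (a.2.1 < b.2.1))

def pvG (E : List (Int × String)) (i : Nat) : List (Nat × Int × String) :=
  (E.filter (fun e => pvRank e.2 == some i)).map (fun e => (i, e.1, e.2))

def pvGroups (E : List (Int × String)) : List (Nat × Int × String) :=
  (List.range 6).flatMap (pvG E)

lemma pv_sorted2_unfold (xs : List (Nat × Int × String)) :
    PySem.List.sorted2 xs (fun t => t.1) (fun t => t.2.1)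
      = xs.foldl (fun acc x => PySem.List.insertBy pvBefore x acc) [] := rfl

lemma pvG_append_none (E : List (Int × String)) (a : Int × String) (h : pvRank a.2 = none) (i : Nat) :
    pvG (E ++ [a]) i = pvG E i := by
  simp [pvG, List.filter_append, h]

lemma pvG_append_some_ne (E : List (Int × String)) (a : Int × String) {r : Nat}
    (h : pvRank a.2 = some r) {i : Nat} (hne : i ≠ r) :
    pvG (E ++ [a]) i = pvG E i := by
  simp [pvG, List.filter_append, h, Ne.symm hne]

lemma pvG_append_some_eq (E : List (Int × String)) (a : Int × String) {r : Nat}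
    (h : pvRank a.2 = some r) :
    pvG (E ++ [a]) r = pvG E r ++ [(r, a.1, a.2)] := by
  simp [pvG, List.filter_append, h]

lemma pv_mem_flatMap_G {E : List (Int × String)} {s n : Nat} {y : Nat × Int × String}
    (hy : y ∈ (List.range' s n).flatMap (pvG E)) :
    ∃ i e, s ≤ i ∧ i < s + n ∧ e ∈ E ∧ pvRank e.2 = some i ∧ y = (i, e.1, e.2) := by
  simp only [List.mem_flatMap, List.mem_range'_1, pvG, List.mem_map, List.mem_filter] at hy
  obtain ⟨i, ⟨h1, h2⟩, e, ⟨he, hr⟩, hye⟩ := hy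
  exact ⟨i, e, h1, h2, he, by simpa using hr, hye.symm⟩

lemma pv_sorted_ranked_eq_groups (E : List (Int × String))
    (hpw : E.Pairwise (fun a b => a.1 < b.1)) :
    PySem.List.sorted2 (E.filterMap (fun e => (pvRank e.2).map (fun r => (r, e.1, e.2))))
      (fun t => t.1) (fun t => t.2.1) = pvGroups E := by
  rw [pv_sorted2_unfold]
  induction E using List.reverseRecOn with
  | nil => simp [pvGroups, pvG]
  | append_singleton E a ih =>
    have hsplit := (List.pairwise_append.mp hpw)
    have hE : E.Pairwise (fun a b => a.1 < b.1) := hsplit.1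
    have hEa : ∀ e ∈ E, e.1 < a.1 := fun e he => hsplit.2.2 e he a (List.mem_singleton_self a)
    rw [List.filterMap_append]
    cases h : pvRank a.2 with
    | none =>
        have : (([a] : List (Int × String)).filterMap (fun e => (pvRank e.2).map (fun r => (r, e.1, e.2)))) = [] := by
          simp [h]
        rw [this, List.append_nil, ih hE]
        unfold pvGroups
        exact (List.flatMap_congr (fun i _ => (pvG_append_none E a h i))).symm
    | some r =>
        have hr6 : r < 6 := pvRank_lt h
        have hfm : (([a] : List (Int × String)).filterMap (fun e => (pvRank e.2).map (fun r => (r, e.1, e.2)))) = [(r, a.1, a.2)] := by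
          simp [h]
        rw [hfm, List.foldl_append, ih hE, List.foldl_cons, List.foldl_nil]
        have hran : List.range 6 = List.range' 0 (r + 1) ++ List.range' (r + 1) (5 - r) := by
          have h1 := @List.range'_append_1 0 (r + 1) (5 - r)
          rw [Nat.zero_add] at h1
          rw [List.range_eq_range', h1]
          congr 1
          omega
        have hran1 : List.range' 0 (r + 1) = List.range' 0 r ++ [r] := by
          simpa using @List.range'_1_concat 0 r
        have hPG : pvGroups E
            = (List.range' 0 (r + 1)).flatMap (pvG E) ++ (List.range' (r + 1) (5 - r)).flatMap (pvG E) := by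
          unfold pvGroups
          rw [hran, List.flatMap_append]
        have hbefP : ∀ y ∈ (List.range' 0 (r + 1)).flatMap (pvG E), pvBefore (r, a.1, a.2) y = false := by
          intro y hy
          obtain ⟨i, e, h0, hi, he, hri, rfl⟩ := pv_mem_flatMap_G hy
          have hea : e.1 < a.1 := hEa e he
          simp only [pvBefore]
          simp only [Bool.or_eq_false_iff, Bool.and_eq_false_iff, decide_eq_false_iff_not,
            Bool.not_eq_false', decide_eq_true_eq]
          omega
        have hS : PySem.List.insertBy pvBefore (r, a.1, a.2) ((List.range' (r + 1) (5 - r)).flatMap (pvG E))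
            = (r, a.1, a.2) :: (List.range' (r + 1) (5 - r)).flatMap (pvG E) := by
          apply pv_insertBy_cons_head
          intro z hz
          obtain ⟨i, e, h0, hi, he, hri, rfl⟩ := pv_mem_flatMap_G (List.mem_of_mem_head? hz)
          simp only [pvBefore]
          simp only [Bool.or_eq_true, decide_eq_true_eq]
          left
          omega
        rw [hPG, pv_insertBy_append _ _ _ _ hbefP, hS]
        unfold pvGroups
        rw [hran, List.flatMap_append, hran1, List.flatMap_append, List.flatMap_append]
        have c1 : List.flatMap (pvG (E ++ [a])) (List.range' 0 r) = List.flatMap (pvG E) (List.range' 0 r) :=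
          List.flatMap_congr (fun i hi => pvG_append_some_ne E a h (by
            have := List.mem_range'_1.mp hi
            omega))
        have c2 : List.flatMap (pvG (E ++ [a])) (List.range' (r + 1) (5 - r))
            = List.flatMap (pvG E) (List.range' (r + 1) (5 - r)) :=
          List.flatMap_congr (fun i hi => pvG_append_some_ne E a h (by
            have := List.mem_range'_1.mp hi
            omega))
        have c3 : List.flatMap (pvG (E ++ [a])) [r] = pvG E r ++ [(r, a.1, a.2)] := by
          simp [pvG_append_some_eq E a h]
        rw [c1, c2, c3]
        simp

-- ranked-building fold of B is a filterMap
lemma pv_ranked_eq_filterMap (E : List (Int × String)) (acc : List (Nat × Int × String)) :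
    E.foldl (fun acc e =>
      match pvRank e.2 with
      | some r => acc ++ [(r, e.1, e.2)]
      | none => acc) acc
    = acc ++ E.filterMap (fun e => (pvRank e.2).map (fun r => (r, e.1, e.2))) := by
  induction E generalizing acc with
  | nil => simp
  | cons e E ih => cases h : pvRank e.2 <;> simp [h, ih]

-- undecorating the sorted groups gives the per-rank filters of the raw paths
lemma pv_groups_map_snd (paths : List String) :
    (pvGroups (PySem.List.enumerate paths)).map (fun t => t.2.2)
      = (List.range 6).flatMap (fun i => paths.filter (fun p => pvRank p == some i)) := by
  unfold pvGroups
  rw [List.map_flatMap]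
  apply List.flatMap_congr
  intro i _
  unfold pvG
  rw [List.map_map]
  have : ((fun t : Nat × Int × String => t.2.2) ∘ fun e : Int × String => (i, e.1, e.2))
      = fun e : Int × String => e.2 := rfl
  rw [this]
  conv_rhs => rw [← PySem.List.map_snd_enumerate paths 0, List.filter_map]
  rfl

-- the two block decompositions build the same ordered set
lemma pv_ofList_eq (paths : List String) :
    PySem.Set.ofList (pvKeywords.flatMap (fun k => paths.filter (fun p => PySem.Str.isIn k p)))
      = PySem.Set.ofList ((List.range 6).flatMap (fun i => paths.filter (fun p => pvRank p == some i))) := by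
  have h := pv_ofList_blocks paths pvKeywords 0 PySem.Set.empty
    (by
      intro m hm
      rw [Nat.zero_add]
      exact List.getElem?_eq_getElem hm)
    (by intro p _ j _ hj; omega)
  have hlen : pvKeywords.length = 6 := rfl
  rw [hlen, ← List.range_eq_range'] at h
  exact h

-- ===== VERDICT (by name: the statement is the Claim_ definition above) =====
theorem pick_primary_image_paths_py_spec : Claim_equal_pick_primary_image_paths_py := by
  intro paths _
  unfold Spec_pick_primary_image_paths_py pick_primary_image_paths_py pick_primary_image_paths_py_alt
  dsimp only
  rw [pv_ranked_eq_filterMap, List.nil_append,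
    pv_sorted_ranked_eq_groups _ (PySem.List.pairwise_lt_enumerate paths 0),
    pv_groups_map_snd, PySem.List.dedup_eq_ofList]
  have hA : (["camera/image", "camera", "color_image", "rgb", "image", "debug"] : List String).foldl
      (fun acc key => paths.foldl (fun acc p => if PySem.Str.isIn key p then acc ++ [p] else acc) acc) []
      = pvKeywords.flatMap (fun key => paths.filter (fun p => PySem.Str.isIn key p)) := by
    rw [show (fun (acc : List String) (key : String) =>
          paths.foldl (fun acc p => if PySem.Str.isIn key p then acc ++ [p] else acc) acc)
        = (fun acc key => acc ++ paths.filter (fun p => PySem.Str.isIn key p)) from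
      funext fun acc => funext fun key => PySem.List.foldl_append_if_eq_filter _ _ _]
    have := PySem.List.foldl_append_eq_flatMap
      (fun key => paths.filter (fun p => PySem.Str.isIn key p)) pvKeywords []
    rw [List.nil_append] at this
    exact this
  rw [hA]
  rw [show (fun (out : List String) p => if out.contains p then out else out ++ [p]) = PySem.Set.add from rfl]
  rw [show ∀ l : List String, l.foldl PySem.Set.add [] = PySem.Set.ofList l from fun l => rfl]
  rw [pv_ofList_eq]
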